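-- pv_equiv track=rewrite | github.com/doheelab/corapaduck | kakao-1.py | solution
-- ===== SOURCE A (Python) =====
-- def compress(word, n):
--     result = ""
--     while len(word)>0:
--         count = 1
--
--         # 비교하기
--         while word[(count-1)*n:count*n] == word[count*n:(count+1)*n] and len(word)>0:
--             count += 1
--
--         # count가 1 이상인 경우
--         if count > 1:
--             result += str(count) + word[:n]
--             word = word[n*count:]
--
--         # count가 1인 경우
--         else:
--             result += word[:n]
--             word = word[n:]
--
--     return len(result)
--
-- def solution(word):
--
--     # 길이가 1인 경우
--     if len(word)==1:
--         return 1
--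
--     length = len(word)
--     shortest = len(word)
--
--     # 길이 1부터 length//2까지 확인
--     for n in range(1, length//2+1):
--         current = compress(word, n)
--         if current < shortest:
--             shortest = current
--
--     return shortest
-- ===== SOURCE B (Python) =====
-- def solution(word):
--     L = len(word)
--     best = L
--     for n in range(1, L // 2 + 1):
--         blocks = [word[i:i + n] for i in range(0, L, n)]
--         total = 0
--         prev = blocks[0]
--         run = 1
--         for b in blocks[1:]:
--             if b == prev:
--                 run += 1
--             else:
--                 total += (len(str(run)) if run > 1 else 0) + len(prev)
--                 prev, run = b, 1
--         total += (len(str(run)) if run > 1 else 0) + len(prev)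
--         if total < best:
--             best = total
--     return best
-- ===== Notes on version B (the rewrite author's own statement) =====
-- stated objective: faster
-- what changed: Replaces A's while-loop that repeatedly compares overlapping slices and rebuilds the remaining string by slicing, with a single chunking of the word into n-sized blocks followed by one run-length fold that sums lengths arithmetically instead of concatenating a result string.
import Mathlib
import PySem

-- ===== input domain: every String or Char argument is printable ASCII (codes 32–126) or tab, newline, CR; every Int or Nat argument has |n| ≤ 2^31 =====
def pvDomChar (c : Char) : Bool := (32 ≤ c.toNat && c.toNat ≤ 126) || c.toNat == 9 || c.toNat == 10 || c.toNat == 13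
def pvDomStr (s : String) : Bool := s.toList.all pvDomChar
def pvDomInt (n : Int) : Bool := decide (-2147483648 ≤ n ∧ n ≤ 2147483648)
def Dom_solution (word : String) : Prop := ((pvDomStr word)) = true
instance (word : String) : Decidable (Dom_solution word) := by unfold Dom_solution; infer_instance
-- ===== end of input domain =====

-- B replaces A's slice-comparing while-loops and string concatenation by one chunking of the
-- word into n-sized blocks and a single run-length fold summing lengths arithmetically
-- (measured constant-factor speed-up; same return value).

-- ===== PORT A =====
-- the inner `while` of compress (fuel only makes the loop total; with the fuel supplied
-- below it runs exactly as Python's loop does)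
def pyInnerA (w : List Char) (n : Int) : Nat → Int → Int
  | 0, count => count
  | fuel + 1, count =>
    if PySem.List.slice w (some ((count - 1) * n)) (some (count * n)) =
         PySem.List.slice w (some (count * n)) (some ((count + 1) * n)) ∧ 0 < w.length
    then pyInnerA w n fuel (count + 1)
    else count

-- the outer `while len(word) > 0` of compress, accumulating `result`
def pyOuterA (n : Int) : Nat → List Char → List Char → List Char
  | 0, _, result => result
  | fuel + 1, word, result =>
    if 0 < word.length then
      let count := pyInnerA word n (word.length + 1) 1
      if 1 < count then
        pyOuterA n fuel (PySem.List.slice word (some (n * count)) none)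
          (result ++ PySem.Int.toChars count ++ PySem.List.slice word none (some n))
      else
        pyOuterA n fuel (PySem.List.slice word (some n) none)
          (result ++ PySem.List.slice word none (some n))
    else result

def compressA (word : List Char) (n : Int) : Int :=
  ((pyOuterA n (word.length + 1) word []).length : Int)

def solution (word : String) : Int :=
  let w := word.toList
  if (w.length : Int) = 1 then 1
  else
    let length : Int := (w.length : Int)
    let shortest : Int := length
    (PySem.List.pyRange 1 (PySem.Int.floordiv length 2 + 1) 1).foldl
      (fun shortest n =>
        let current := compressA w n
        if current < shortest then current else shortest) shortest

-- ===== PORT B =====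
-- fold step over the tail of the block list: state (total, prev, run)
def bStep (st : Int × List Char × Int) (b : List Char) : Int × List Char × Int :=
  match st with
  | (total, prev, run) =>
    if b = prev then (total, prev, run + 1)
    else (total + (if 1 < run then ((PySem.Int.toChars run).length : Int) else 0) + (prev.length : Int), b, 1)

def solution_alt (word : String) : Int :=
  let w := word.toList
  let L : Int := (w.length : Int)
  (PySem.List.pyRange 1 (PySem.Int.floordiv L 2 + 1) 1).foldl
    (fun best n =>
      let blocks := (PySem.List.pyRange 0 L n).map
        (fun i => PySem.List.slice w (some i) (some (i + n)))
      match blocks with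
      | [] => best   -- unreachable: when the outer range is nonempty, L ≥ 2 and blocks ≠ []
      | p :: rest =>
        match rest.foldl bStep (0, p, 1) with
        | (total, prev, run) =>
          let total := total + (if 1 < run then ((PySem.Int.toChars run).length : Int) else 0)
                         + (prev.length : Int)
          if total < best then total else best) L

-- ===== PRECONDITION & SPEC =====
def Spec_solution (word : String) (out : Int) : Prop := out = solution_alt word
instance (word : String) (out : Int) : Decidable (Spec_solution word out) := by
  unfold Spec_solution; infer_instance

-- ===== CLAIM (what is proved, stated in full; the proofs are below) =====
def Claim_equal_solution : Prop := ∀ (word : String), Dom_solution word → Spec_solution word (solution word)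

-- ===== LEMMAS AND PROOFS =====

-- block list: w cut into chunks of size m+1 (size written as m+1 so the recursion terminates)
def blkC (m : Nat) : List Char → List (List Char)
  | [] => []
  | c :: w => ((c :: w).take (m + 1)) :: blkC m ((c :: w).drop (m + 1))
  termination_by w => w.length
  decreasing_by simp

-- digit cost of a run counter
def costZ (r : Int) : Int := if 1 < r then ((PySem.Int.toChars r).length : Int) else 0

-- length of the leading run of blocks equal to b
def leadB (b : List Char) (bs : List (List Char)) : Nat :=
  (bs.takeWhile (fun x => x == b)).length

-- compressed length of a block list, run by run
def runLenC : List (List Char) → Int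
  | [] => 0
  | b :: bs =>
    costZ (1 + (leadB b bs : Int)) + (b.length : Int) + runLenC (bs.drop (leadB b bs))
  termination_by l => l.length
  decreasing_by simp

theorem blkC_nil (m : Nat) : blkC m [] = [] := by simp [blkC]

theorem blkC_cons (m : Nat) (w : List Char) (hw : w ≠ []) :
    blkC m w = w.take (m + 1) :: blkC m (w.drop (m + 1)) := by
  cases w with
  | nil => simp at hw
  | cons c w => simp [blkC]

theorem blk_getD (m : Nat) : ∀ (i : Nat) (w : List Char),
    (w.drop (i * (m + 1))).take (m + 1) = (blkC m w).getD i [] := by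
  intro i
  induction i with
  | zero =>
    intro w
    cases w with
    | nil => simp [blkC]
    | cons c w => simp [blkC]
  | succ i ih =>
    intro w
    cases w with
    | nil => simp [blkC]
    | cons c w =>
      rw [blkC_cons m _ (by simp)]
      have h1 : (i + 1) * (m + 1) = (m + 1) + i * (m + 1) := by ring
      rw [h1, ← List.drop_drop]
      simpa using ih ((c :: w).drop (m + 1))

theorem blkC_length_le (m : Nat) : ∀ w : List Char, (blkC m w).length ≤ w.length := by
  intro w
  induction w using blkC.induct m with
  | case1 => simp [blkC]
  | case2 c w ih =>
    rw [blkC_cons m _ (by simp)]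
    simp at ih ⊢
    omega

theorem blkC_drop (m : Nat) : ∀ (c : Nat) (w : List Char),
    blkC m (w.drop ((m + 1) * c)) = (blkC m w).drop c := by
  intro c
  induction c with
  | zero => simp
  | succ c ih =>
    intro w
    cases w with
    | nil => simp [blkC]
    | cons a w =>
      conv_rhs => rw [blkC_cons m _ (by simp)]
      have h1 : (m + 1) * (c + 1) = (m + 1) + (m + 1) * c := by ring
      rw [h1, ← List.drop_drop, List.drop_succ_cons]
      exact ih ((a :: w).drop (m + 1))

theorem pyOuterA_append (n : Int) : ∀ (fuel : Nat) (w res : List Char),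
    pyOuterA n fuel w res = res ++ pyOuterA n fuel w [] := by
  intro fuel
  induction fuel with
  | zero => intro w res; simp [pyOuterA]
  | succ f ih =>
    intro w res
    simp only [pyOuterA]
    split_ifs with h1 h2
    · conv_lhs => rw [ih]
      conv_rhs => rw [ih]
      simp
    · conv_lhs => rw [ih]
      conv_rhs => rw [ih]
      simp
    · simp

theorem inner_run (m : Nat) (w : List Char) (b : List Char) (bs : List (List Char))
    (hw : blkC m w = b :: bs) : ∀ (fuel c : Nat), 1 ≤ c →
    (blkC m w).getD (c - 1) [] = b →
    leadB b ((blkC m w).drop c) < fuel →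
    pyInnerA w ((m : Int) + 1) fuel (c : Int)
      = (c : Int) + (leadB b ((blkC m w).drop c) : Int) := by
  have hwne : w ≠ [] := by
    intro h; rw [h, blkC_nil] at hw; simp at hw
  have hwlen : 0 < w.length := List.length_pos_iff.mpr hwne
  have hb : b = w.take (m + 1) := by
    rw [blkC_cons m w hwne] at hw
    injection hw with h1 h2
    exact h1.symm
  have hb0 : b ≠ [] := by
    rw [hb]
    simp [List.take_eq_nil_iff]
    omega
  intro fuel
  induction fuel with
  | zero => intro c hc hgd hlt; omega
  | succ f ih =>
    intro c hc hgd hlt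
    have e1 : ((c : Int) - 1) * ((m : Int) + 1) = (((c - 1) * (m + 1) : Nat) : Int) := by
      push_cast [Nat.cast_sub hc]; ring
    have e2 : (c : Int) * ((m : Int) + 1) = ((c * (m + 1) : Nat) : Int) := by
      push_cast; ring
    have e3 : ((c : Int) + 1) * ((m : Int) + 1) = (((c + 1) * (m + 1) : Nat) : Int) := by
      push_cast; ring
    obtain ⟨c', rfl⟩ : ∃ c', c = c' + 1 := ⟨c - 1, by omega⟩
    have hsub1 : (c' + 1) * (m + 1) - c' * (m + 1) = m + 1 := by
      simp [Nat.succ_mul]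
    have hsub2 : (c' + 1 + 1) * (m + 1) - (c' + 1) * (m + 1) = m + 1 := by
      simp [Nat.succ_mul]
    simp only [pyInnerA]
    rw [e1, e2, e3, PySem.List.slice_natCast, PySem.List.slice_natCast]
    simp only [Nat.add_sub_cancel] at hgd ⊢
    rw [hsub1, hsub2, blk_getD, blk_getD, hgd]
    by_cases hEq : (blkC m w).getD (c' + 1) [] = b
    · rw [if_pos ⟨hEq.symm, hwlen⟩]
      have hclt : c' + 1 < (blkC m w).length := by
        by_contra h
        rw [List.getD_eq_default _ _ (by omega)] at hEq
        exact hb0 hEq.symm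
      have hdropc : (blkC m w).drop (c' + 1)
          = (blkC m w)[c' + 1] :: (blkC m w).drop (c' + 1 + 1) :=
        List.drop_eq_getElem_cons hclt
      have hgc : (blkC m w)[c' + 1] = b := by
        rw [← List.getD_eq_getElem _ [] hclt]; exact hEq
      have hlead : leadB b ((blkC m w).drop (c' + 1))
          = 1 + leadB b ((blkC m w).drop (c' + 1 + 1)) := by
        rw [leadB, hdropc, List.takeWhile_cons_of_pos (by simp [hgc])]
        simp [leadB]
        omega
      have := ih (c' + 1 + 1) (by omega) (by simpa using hEq) (by omega)
      rw [show ((c' + 1 : Nat) : Int) + 1 = ((c' + 1 + 1 : Nat) : Int) by push_cast; ring, this]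
      rw [hlead]
      push_cast
      ring
    · rw [if_neg (by rintro ⟨h, -⟩; exact hEq h.symm)]
      have hlead : leadB b ((blkC m w).drop (c' + 1)) = 0 := by
        by_cases hclt : c' + 1 < (blkC m w).length
        · rw [leadB, List.drop_eq_getElem_cons hclt,
            List.takeWhile_cons_of_neg (by simp; intro h; exact hEq (by rw [← List.getD_eq_getElem _ [] hclt] at h; exact h))]
          simp
        · rw [leadB, List.drop_eq_nil_of_le (by omega)]
          simp
      rw [hlead]
      simp

theorem outer_len (m : Nat) : ∀ (fuel : Nat) (w : List Char), w.length ≤ fuel →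
    ((pyOuterA ((m : Int) + 1) fuel w []).length : Int) = runLenC (blkC m w) := by
  intro fuel
  induction fuel with
  | zero =>
    intro w h
    have : w = [] := by cases w <;> simp_all
    subst this
    simp [pyOuterA, blkC_nil, runLenC]
  | succ f ih =>
    intro w hwf
    by_cases hwne : w = []
    · subst hwne
      simp [pyOuterA, blkC_nil, runLenC]
    · have hwlen : 0 < w.length := List.length_pos_iff.mpr hwne
      have hcons := blkC_cons m w hwne
      set b := w.take (m + 1) with hbdef
      set bs := blkC m (w.drop (m + 1)) with hbsdef
      have hdrop1 : (blkC m w).drop 1 = bs := by rw [hcons]; rfl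
      have hleadbd : leadB b ((blkC m w).drop 1) < w.length + 1 := by
        have h1 : leadB b ((blkC m w).drop 1) ≤ ((blkC m w).drop 1).length :=
          (List.takeWhile_sublist _).length_le
        have h2 := blkC_length_le m w
        have h3 : ((blkC m w).drop 1).length = (blkC m w).length - 1 := by simp
        omega
      have hinner := inner_run m w b bs hcons (w.length + 1) 1 (le_refl 1)
        (by rw [hcons]; simp) hleadbd
      rw [Nat.cast_one] at hinner
      set k := leadB b ((blkC m w).drop 1) with hkdef
      simp only [pyOuterA, if_pos hwlen]
      rw [hinner]
      have hrun : runLenC (blkC m w) = costZ (1 + (k : Int)) + (b.length : Int)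
          + runLenC (bs.drop k) := by
        rw [hcons, runLenC]
        rw [hdrop1] at hkdef
        rw [← hkdef]
      have hslice_to : PySem.List.slice w none (some ((m : Int) + 1)) = b := by
        rw [show ((m : Int) + 1) = ((m + 1 : Nat) : Int) by push_cast; ring,
          PySem.List.slice_to_natCast]
      by_cases hk : k = 0
      · rw [if_neg (by omega)]
        rw [pyOuterA_append]
        have hslice_from : PySem.List.slice w (some ((m : Int) + 1)) none = w.drop (m + 1) := by
          rw [show ((m : Int) + 1) = ((m + 1 : Nat) : Int) by push_cast; ring,
            PySem.List.slice_from_natCast]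
        rw [hslice_from, hslice_to]
        have hlen : (w.drop (m + 1)).length ≤ f := by simp; omega
        have hthis := ih (w.drop (m + 1)) hlen
        rw [← hbsdef] at hthis
        rw [hrun, hk]
        simp only [List.nil_append, List.length_append, List.drop_zero]
        push_cast
        rw [hthis]
        simp [costZ]
      · rw [if_pos (by omega)]
        rw [pyOuterA_append]
        have e4 : ((m : Int) + 1) * (1 + (k : Int)) = (((m + 1) * (1 + k) : Nat) : Int) := by
          push_cast; ring
        rw [e4, PySem.List.slice_from_natCast, hslice_to]
        have hmul1 : 1 ≤ (m + 1) * (1 + k) := Nat.one_le_iff_ne_zero.mpr (by positivity)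
        have hlen : (w.drop ((m + 1) * (1 + k))).length ≤ f := by simp; omega
        have hrec := ih (w.drop ((m + 1) * (1 + k))) hlen
        rw [blkC_drop] at hrec
        have hdropk : (blkC m w).drop (1 + k) = bs.drop k := by
          rw [Nat.add_comm, ← hdrop1, List.drop_drop]
          congr 1
          omega
        rw [hdropk] at hrec
        rw [hrun]
        have hcost : costZ (1 + (k : Int)) = ((PySem.Int.toChars (1 + (k : Int))).length : Int) := by
          rw [costZ, if_pos (by omega)]
        rw [hcost]
        simp only [List.nil_append, List.length_append]
        push_cast
        rw [hrec]

theorem bfold : ∀ (bs : List (List Char)) (total : Int) (prev : List Char) (run : Int),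
    (bs.foldl bStep (total, prev, run)).1
        + costZ (bs.foldl bStep (total, prev, run)).2.2
        + (((bs.foldl bStep (total, prev, run)).2.1.length : Nat) : Int)
      = total + costZ (run + (leadB prev bs : Int)) + (prev.length : Int)
          + runLenC (bs.drop (leadB prev bs)) := by
  intro bs
  induction bs with
  | nil => intro total prev run; simp [leadB, runLenC]
  | cons b bs ih =>
    intro total prev run
    simp only [List.foldl_cons, bStep]
    by_cases hb : b = prev
    · rw [if_pos hb, ih]
      have hlead : leadB prev (b :: bs) = 1 + leadB prev bs := by
        rw [leadB, List.takeWhile_cons_of_pos (by simp [hb])]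
        simp [leadB]
        omega
      rw [hlead]
      have hdr : (b :: bs).drop (1 + leadB prev bs) = bs.drop (leadB prev bs) := by
        rw [Nat.add_comm, List.drop_succ_cons]
      rw [hdr]
      have harg : run + 1 + (leadB prev bs : Int) = run + ((1 + leadB prev bs : Nat) : Int) := by
        push_cast; ring
      rw [harg]
    · rw [if_neg hb, ih]
      have hlead : leadB prev (b :: bs) = 0 := by
        rw [leadB, List.takeWhile_cons_of_neg (by simp [hb])]
        rfl
      rw [hlead]
      rw [show (b :: bs).drop 0 = b :: bs from rfl, runLenC]
      have hc : (if (1:Int) < run then ((PySem.Int.toChars run).length : Int) else 0) = costZ run := rfl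
      rw [hc]
      push_cast
      simp only [add_zero]
      linarith

theorem rangeMap (m : Nat) : ∀ w : List Char,
    (List.range ((w.length + m) / (m + 1))).map
        (fun k => (w.drop ((m + 1) * k)).take (m + 1)) = blkC m w := by
  intro w
  induction w using blkC.induct m with
  | case1 => rw [blkC_nil]; simp [Nat.div_eq_of_lt]
  | case2 c w ih =>
    have hK : ((c :: w).length + m) / (m + 1)
        = ((((c :: w).drop (m + 1)).length + m) / (m + 1)) + 1 := by
      simp only [List.length_cons, List.length_drop]
      by_cases h : w.length + 1 ≤ m + 1
      · have h1 : w.length + 1 - (m + 1) = 0 := by omega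
        have hz : (0 + m) / (m + 1) = 0 := Nat.div_eq_of_lt (by omega)
        have h2 : (w.length + 1 + m) / (m + 1) = 1 :=
          Nat.div_eq_of_lt_le (by omega) (by omega)
        rw [h1, hz, h2]
      · have h1 : w.length + 1 + m = (w.length + 1 - (m + 1) + m) + (m + 1) := by omega
        rw [h1, Nat.add_div_right _ (by omega)]
    rw [hK, List.range_succ_eq_map, List.map_cons, List.map_map]
    rw [blkC_cons m _ (by simp)]
    refine List.cons_eq_cons.mpr ⟨by simp, ?_⟩
    rw [← ih]
    apply List.map_congr_left
    intro k _
    simp only [Function.comp_apply, List.drop_drop]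
    congr 2
    simp only [Nat.mul_succ]
    ring

theorem blocks_eq (m : Nat) : ∀ w : List Char,
    (PySem.List.pyRange 0 (w.length : Int) ((m : Int) + 1)).map
        (fun i => PySem.List.slice w (some i) (some (i + ((m : Int) + 1))))
      = blkC m w := by
  intro w
  rw [PySem.List.pyRange_of_pos 0 (w.length : Int) (by omega)]
  have ed : ((m : Int) + 1) = (((m + 1 : Nat)) : Int) := by push_cast; ring
  have hcnt : (if (0 : Int) < (w.length : Int) then
        (((w.length : Int) - 0 + ((m : Int) + 1) - 1) / ((m : Int) + 1)).toNat else 0)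
      = (w.length + m) / (m + 1) := by
    by_cases h0 : w.length = 0
    · rw [if_neg (by simp [h0]), h0]
      rw [Nat.div_eq_of_lt (by omega)]
    · rw [if_pos (by exact_mod_cast Nat.pos_of_ne_zero h0)]
      have e : ((w.length : Int) - 0 + ((m : Int) + 1) - 1) = ((w.length + m : Nat) : Int) := by
        push_cast; ring
      rw [e, ed]
      rfl
  rw [hcnt, ← rangeMap m w, List.map_map]
  apply List.map_congr_left
  intro k _
  simp only [Function.comp_apply]
  have e1 : (0 + ((m : Int) + 1) * (k : Int)) = (((m + 1) * k : Nat) : Int) := by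
    push_cast; ring
  have e2 : (0 + ((m : Int) + 1) * (k : Int) + ((m : Int) + 1))
      = ((((m + 1) * k + (m + 1)) : Nat) : Int) := by
    push_cast; ring
  rw [e2, e1, PySem.List.slice_natCast, Nat.add_sub_cancel_left]

-- ===== VERDICT (by name: the statement is the Claim_ definition above) =====
theorem solution_spec : Claim_equal_solution := by
  unfold Claim_equal_solution Spec_solution
  intro word _
  simp only [solution, solution_alt]
  by_cases h1 : ((word.toList.length : Nat) : Int) = 1
  · rw [if_pos h1]
    have hlen : word.toList.length = 1 := by exact_mod_cast h1
    rw [hlen]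
    have h2 : PySem.Int.floordiv ((1 : Nat) : Int) 2 + 1 = 1 := by decide
    rw [h2, PySem.List.pyRange_one_eq_nil (le_refl 1)]
    simp
  · rw [if_neg h1]
    apply PySem.List.foldl_congr_mem
    intro acc n hn
    obtain ⟨hn1, hn2⟩ := PySem.List.mem_pyRange_one.mp hn
    have hfd : PySem.Int.floordiv ((word.toList.length : Nat) : Int) 2
        = ((word.toList.length / 2 : Nat) : Int) := by
      exact_mod_cast PySem.Int.floordiv_natCast word.toList.length 2
    rw [hfd] at hn2
    have hn2' : n.toNat ≤ word.toList.length / 2 := by omega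
    have hL2 : 2 ≤ word.toList.length := by
      have : 1 ≤ word.toList.length / 2 := by omega
      omega
    obtain ⟨mm, hmm⟩ : ∃ mm, n.toNat = mm + 1 := ⟨n.toNat - 1, by omega⟩
    have hneq : n = ((mm : Int) + 1) := by omega
    rw [hneq]
    have hwne : word.toList ≠ [] := by
      intro h
      rw [h] at hL2
      simp at hL2
    have hA : compressA word.toList ((mm : Int) + 1) = runLenC (blkC mm word.toList) := by
      simpa only [compressA] using outer_len mm (word.toList.length + 1) word.toList (by omega)
    rw [hA, blocks_eq mm word.toList, blkC_cons mm word.toList hwne]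
    set b := word.toList.take (mm + 1) with hbdef
    set bs := blkC mm (word.toList.drop (mm + 1)) with hbsdef
    rcases hst : bs.foldl bStep (0, b, 1) with ⟨t, st2⟩
    rcases st2 with ⟨p, r⟩
    have hbf := bfold bs 0 b 1
    rw [hst] at hbf
    have hc : (if (1 : Int) < r then ((PySem.Int.toChars r).length : Int) else 0) = costZ r := rfl
    have hrl : runLenC (b :: bs)
        = costZ (1 + (leadB b bs : Int)) + (b.length : Int) + runLenC (bs.drop (leadB b bs)) := by
      rw [runLenC]
    have hB : t + costZ r + ((p.length : Nat) : Int) = runLenC (b :: bs) := by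
      rw [hrl]
      simp only at hbf
      linarith [hbf]
    simp only [hst, hc]
    rw [hB]
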